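-- pv_equiv track=rewrite | github.com/Tsukumo3/Atcoder | ABC/129/C-typicalAns1.py | f
-- ===== SOURCE A (Python) =====
-- MOD =  1000000007
--
-- def f(N, A):
--     c0 = 0
--     c1 = 1
--
--     for i in range(1, N+1):
--         c0, c1 = c1, (c0+c1)%MOD
--
--         if i in A:
--             c1 = 0
--
--     return c1
-- ===== SOURCE B (Python) =====
-- MOD = 1000000007
--
--
-- def f(N, A):
--     broken = sorted({b for b in A if 1 <= b <= N})
--
--     def mul(X, Y):
--         return ((X[0] * Y[0] + X[1] * Y[2]) % MOD,
--                 (X[0] * Y[1] + X[1] * Y[3]) % MOD,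
--                 (X[2] * Y[0] + X[3] * Y[2]) % MOD,
--                 (X[2] * Y[1] + X[3] * Y[3]) % MOD)
--
--     def adv(v, k):
--         # v -> M^k v with M = [[0,1],[1,1]], by square-and-multiply
--         P = (1, 0, 0, 1)
--         X = (0, 1, 1, 1)
--         while k > 0:
--             if k % 2 == 1:
--                 P = mul(P, X)
--             X = mul(X, X)
--             k //= 2
--         return ((P[0] * v[0] + P[1] * v[1]) % MOD,
--                 (P[2] * v[0] + P[3] * v[1]) % MOD)
--
--     v = (0, 1)
--     idx = 0
--     for b in broken:
--         v = adv(v, b - idx)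
--         v = (v[0], 0)
--         idx = b
--     v = adv(v, N - idx)
--     return v[1]
-- ===== Notes on version B (the rewrite author's own statement) =====
-- stated objective: faster
-- what changed: Instead of stepping through all N stairs and scanning A at each step, B dedups and sorts the broken steps in 1..N once and jumps between consecutive broken steps (and to N) by 2x2 matrix exponentiation of the Fibonacci step matrix mod 1e9+7, zeroing the current-ways component at each broken step.
import Mathlib
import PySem

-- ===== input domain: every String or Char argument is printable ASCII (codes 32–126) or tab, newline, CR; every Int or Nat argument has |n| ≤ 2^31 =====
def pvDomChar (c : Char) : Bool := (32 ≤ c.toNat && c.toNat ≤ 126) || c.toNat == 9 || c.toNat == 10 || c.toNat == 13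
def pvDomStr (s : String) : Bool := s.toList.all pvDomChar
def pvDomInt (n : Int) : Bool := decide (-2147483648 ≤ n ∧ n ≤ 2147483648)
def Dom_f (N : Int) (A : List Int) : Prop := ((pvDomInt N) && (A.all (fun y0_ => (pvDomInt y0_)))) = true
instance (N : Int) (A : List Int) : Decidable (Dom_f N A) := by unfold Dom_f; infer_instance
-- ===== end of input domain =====

-- B replaces A's step-by-step walk over all N stairs (with a list scan per stair) by
-- sorting the deduplicated broken stairs and jumping between them with 2x2 matrix
-- exponentiation mod 1e9+7 (return values agree; faster in a timing run).

def pvMOD : Int := 1000000007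

-- ===== PORT A =====
def f (N : Int) (A : List Int) : Int :=
  ((PySem.List.pyRange 1 (N + 1) 1).foldl
    (fun (s : Int × Int) i =>
      let s' : Int × Int := (s.2, (s.1 + s.2) % pvMOD)
      if i ∈ A then (s'.1, 0) else s') ((0 : Int), (1 : Int))).2

-- ===== PORT B =====
-- 2x2 matrices as 4-tuples (row major), entries kept reduced mod pvMOD
def pvMul : (Int × Int × Int × Int) → (Int × Int × Int × Int) → (Int × Int × Int × Int)
  | (a, b, c, d), (e, g, h, k) =>
      ((a * e + b * h) % pvMOD, (a * g + b * k) % pvMOD,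
       (c * e + d * h) % pvMOD, (c * g + d * k) % pvMOD)

-- the 'while k > 0' square-and-multiply loop of Source B's adv
def pvPowLoop (P X : Int × Int × Int × Int) (k : Int) : Int × Int × Int × Int :=
  if _h : 0 < k then
    pvPowLoop (if PySem.Int.mod k 2 == 1 then pvMul P X else P) (pvMul X X)
      (PySem.Int.floordiv k 2)
  else P
termination_by k.toNat
decreasing_by
  rw [PySem.Int.floordiv_eq_ediv_of_pos (by omega : (0:Int) < 2)]
  omega

-- matrix applied to a column vector, entries reduced
def pvApp : (Int × Int × Int × Int) → (Int × Int) → (Int × Int)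
  | (p, q, r, s), (x, y) => ((p * x + q * y) % pvMOD, (r * x + s * y) % pvMOD)

-- Source B's adv: v -> M^k v with M = [[0,1],[1,1]]
def pvAdv (v : Int × Int) (k : Int) : Int × Int :=
  pvApp (pvPowLoop (1, 0, 0, 1) (0, 1, 1, 1) k) v

-- Source B's 'for b in broken' loop followed by the final advance to N
def pvLoop (N : Int) : List Int → (Int × Int) → Int → Int × Int
  | [], v, idx => pvAdv v (N - idx)
  | b :: rest, v, idx => pvLoop N rest ((pvAdv v (b - idx)).1, 0) b

def f_alt (N : Int) (A : List Int) : Int :=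
  let broken := PySem.List.sorted
    (PySem.Set.ofList (A.filter (fun b => decide (1 ≤ b ∧ b ≤ N)))) (fun x => x) false
  (pvLoop N broken (0, 1) 0).2

-- ===== PRECONDITION & SPEC =====
def Spec_f (N : Int) (A : List Int) (out : Int) : Prop := out = f_alt N A
instance (N : Int) (A : List Int) (out : Int) : Decidable (Spec_f N A out) := by unfold Spec_f; infer_instance

-- ===== CLAIM (what is proved, stated in full; the proofs are below) =====
def Claim_equal_f : Prop := ∀ (N : Int) (A : List Int), Dom_f N A → Spec_f N A (f N A)

-- ===== LEMMAS AND PROOFS =====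

-- one DP step of A: (ways[i-1], ways[i]) -> (ways[i], ways[i+1])
def pvStep (s : Int × Int) : Int × Int := (s.2, (s.1 + s.2) % pvMOD)

-- both components reduced mod pvMOD
def pvRed (v : Int × Int) : Prop := 0 ≤ v.1 ∧ v.1 < pvMOD ∧ 0 ≤ v.2 ∧ v.2 < pvMOD

theorem pvmod_eq {x y : Int} (h : x ≡ y [ZMOD pvMOD]) : x % pvMOD = y % pvMOD := h

theorem pvmod_modeq (t : Int) : (t % pvMOD) ≡ t [ZMOD pvMOD] := Int.emod_emod_of_dvd t dvd_rfl

theorem pvRow (a b e g h k x y : Int) :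
    ((a*e+b*h) % pvMOD * x + (a*g+b*k) % pvMOD * y) % pvMOD
      = (a*((e*x+g*y) % pvMOD) + b*((h*x+k*y) % pvMOD)) % pvMOD := by
  apply pvmod_eq
  calc (a*e+b*h) % pvMOD * x + (a*g+b*k) % pvMOD * y
      ≡ (a*e+b*h) * x + (a*g+b*k) * y [ZMOD pvMOD] :=
        ((pvmod_modeq _).mul_right x).add ((pvmod_modeq _).mul_right y)
    _ = a*(e*x+g*y) + b*(h*x+k*y) := by ring
    _ ≡ a*((e*x+g*y) % pvMOD) + b*((h*x+k*y) % pvMOD) [ZMOD pvMOD] :=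
        (((pvmod_modeq _).mul_left a).add ((pvmod_modeq _).mul_left b)).symm

theorem pvApp_pvMul (X Y : Int × Int × Int × Int) (v : Int × Int) :
    pvApp (pvMul X Y) v = pvApp X (pvApp Y v) := by
  obtain ⟨a, b, c, d⟩ := X
  obtain ⟨e, g, h, k⟩ := Y
  obtain ⟨x, y⟩ := v
  simp only [pvMul, pvApp, Prod.mk.injEq]
  exact ⟨pvRow a b e g h k x y, pvRow c d e g h k x y⟩

theorem pvIter_double (X : Int × Int × Int × Int) (n : Nat) (v : Int × Int) :
    (pvApp (pvMul X X))^[n] v = (pvApp X)^[2*n] v := by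
  induction n generalizing v with
  | zero => rfl
  | succ n ih =>
      rw [Function.iterate_succ_apply, pvApp_pvMul, ih,
        show 2*(n+1) = (2*n).succ.succ from by omega,
        Function.iterate_succ_apply, Function.iterate_succ_apply]

theorem pvPowLoop_app (P X : Int × Int × Int × Int) (k : Int) :
    ∀ v, pvApp (pvPowLoop P X k) v = pvApp P ((pvApp X)^[k.toNat] v) := by
  induction P, X, k using pvPowLoop.induct with
  | case2 P X k hk =>
      intro v
      rw [pvPowLoop, dif_neg hk, show k.toNat = 0 from by omega, Function.iterate_zero_apply]
  | case1 P X k hk ih =>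
      intro v
      rw [pvPowLoop, dif_pos hk]
      simp only [dite_eq_ite] at ih
      rw [ih v, pvIter_double]
      have hq : PySem.Int.floordiv k 2 = k / 2 := PySem.Int.floordiv_eq_ediv_of_pos (by omega)
      have hr : PySem.Int.mod k 2 = k % 2 := PySem.Int.mod_eq_emod_of_pos (by omega)
      by_cases hodd : k % 2 = 1
      · rw [if_pos (by rw [hr]; simp [hodd]), pvApp_pvMul,
          show 2 * (PySem.Int.floordiv k 2).toNat = k.toNat - 1 from by rw [hq]; omega,
          show pvApp X ((pvApp X)^[k.toNat - 1] v) = (pvApp X)^[k.toNat] v from by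
            rw [← Function.iterate_succ_apply' (pvApp X) (k.toNat - 1) v]
            congr 1
            omega]
      · rw [if_neg (by rw [hr]; simp [hodd]),
          show 2 * (PySem.Int.floordiv k 2).toNat = k.toNat from by rw [hq]; omega]

theorem pvRed_step {v : Int × Int} (h : pvRed v) : pvRed (pvStep v) := by
  obtain ⟨x, y⟩ := v
  obtain ⟨h1, h2, h3, h4⟩ := h
  have hm : (0:Int) < pvMOD := by norm_num [pvMOD]
  exact ⟨h3, h4, Int.emod_nonneg _ (by omega), Int.emod_lt_of_pos _ hm⟩

theorem pvApp_M_step {v : Int × Int} (h : pvRed v) : pvApp (0, 1, 1, 1) v = pvStep v := by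
  obtain ⟨x, y⟩ := v
  obtain ⟨h1, h2, h3, h4⟩ := h
  simp only [pvApp, pvStep, Prod.mk.injEq]
  constructor
  · rw [show (0*x + 1*y : Int) = y from by ring]
    exact Int.emod_eq_of_lt h3 h4
  · rw [show (1*x + 1*y : Int) = x + y from by ring]

theorem pvIter_app_eq_step (n : Nat) (v : Int × Int) (h : pvRed v) :
    (pvApp (0, 1, 1, 1))^[n] v = pvStep^[n] v ∧ pvRed (pvStep^[n] v) := by
  induction n generalizing v with
  | zero => exact ⟨rfl, h⟩
  | succ n ih =>
      rw [Function.iterate_succ_apply, Function.iterate_succ_apply, pvApp_M_step h]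
      exact ih (pvStep v) (pvRed_step h)

theorem pvApp_I {w : Int × Int} (h : pvRed w) : pvApp (1, 0, 0, 1) w = w := by
  obtain ⟨x, y⟩ := w
  obtain ⟨h1, h2, h3, h4⟩ := h
  simp only [pvApp, Prod.mk.injEq]
  constructor
  · rw [show (1*x + 0*y : Int) = x from by ring]
    exact Int.emod_eq_of_lt h1 h2
  · rw [show (0*x + 1*y : Int) = y from by ring]
    exact Int.emod_eq_of_lt h3 h4

theorem pvAdv_eq (v : Int × Int) (k : Int) (h : pvRed v) :
    pvAdv v k = pvStep^[k.toNat] v := by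
  have h2 := pvIter_app_eq_step k.toNat v h
  rw [pvAdv, pvPowLoop_app, h2.1, pvApp_I h2.2]

theorem pvFoldl_const (l : List Int) (v : Int × Int) :
    l.foldl (fun s _ => pvStep s) v = pvStep^[l.length] v := by
  induction l generalizing v with
  | nil => rfl
  | cons a l ih => rw [List.foldl_cons, List.length_cons, Function.iterate_succ_apply, ih]

theorem pvSeg (L : List Int) : ∀ (N idx : Int) (BR : List Int) (v : Int × Int),
    pvRed v →
    (∀ i, idx < i → i ≤ N → (i ∈ BR ↔ i ∈ L)) →
    L.Pairwise (· < ·) →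
    (∀ b ∈ L, idx < b ∧ b ≤ N) →
    pvLoop N L v idx =
      (PySem.List.pyRange (idx + 1) (N + 1) 1).foldl
        (fun (s : Int × Int) i =>
          let s' : Int × Int := (s.2, (s.1 + s.2) % pvMOD)
          if i ∈ BR then (s'.1, 0) else s') v := by
  induction L with
  | nil =>
      intro N idx BR v hred hmem _ _
      have h1 : (PySem.List.pyRange (idx + 1) (N + 1) 1).foldl
          (fun (s : Int × Int) i =>
            let s' : Int × Int := (s.2, (s.1 + s.2) % pvMOD)
            if i ∈ BR then (s'.1, 0) else s') v =
          (PySem.List.pyRange (idx + 1) (N + 1) 1).foldl (fun s _ => pvStep s) v := by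
        apply PySem.List.foldl_congr_mem
        intro acc i hi
        have hi' := (PySem.List.mem_pyRange_one).mp hi
        have : i ∉ BR := by
          intro hin
          exact absurd ((hmem i (by omega) (by omega)).mp hin) (List.not_mem_nil)
        show (if i ∈ BR then _ else _) = pvStep acc
        rw [if_neg this]
        rfl
      rw [pvLoop, pvAdv_eq v _ hred, h1, pvFoldl_const, PySem.List.length_pyRange_one,
        show (N + 1 - (idx + 1) : Int) = N - idx from by ring]
  | cons b rest ih =>
      intro N idx BR v hred hmem hpw hbd
      have hbb : idx < b ∧ b ≤ N := hbd b List.mem_cons_self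
      have hbrest : ∀ x ∈ rest, b < x := (List.pairwise_cons.mp hpw).1
      have hpw' : rest.Pairwise (· < ·) := (List.pairwise_cons.mp hpw).2
      have hredw : pvRed (pvStep^[(b - idx).toNat] v) := (pvIter_app_eq_step _ v hred).2
      have hred1 : pvRed ((pvStep^[(b - idx).toNat] v).1, 0) :=
        ⟨hredw.1, hredw.2.1, by norm_num, by norm_num [pvMOD]⟩
      have hmem' : ∀ i, b < i → i ≤ N → (i ∈ BR ↔ i ∈ rest) := by
        intro i h1 h2
        rw [hmem i (by omega) h2, List.mem_cons]
        constructor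
        · rintro (rfl | h)
          · omega
          · exact h
        · exact Or.inr
      have hbd' : ∀ x ∈ rest, b < x ∧ x ≤ N := fun x hx =>
        ⟨hbrest x hx, (hbd x (List.mem_cons_of_mem b hx)).2⟩
      rw [pvLoop, pvAdv_eq v _ hred, ih N b BR _ hred1 hmem' hpw' hbd',
        PySem.List.pyRange_one_append (idx + 1) (b + 1) (N + 1) (by omega) (by omega),
        List.foldl_append]
      congr 1
      rw [PySem.List.pyRange_one_succ_right (by omega : idx + 1 ≤ b), List.foldl_append,
        List.foldl_cons, List.foldl_nil]
      have h1 : (PySem.List.pyRange (idx + 1) b 1).foldl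
          (fun (s : Int × Int) i =>
            let s' : Int × Int := (s.2, (s.1 + s.2) % pvMOD)
            if i ∈ BR then (s'.1, 0) else s') v =
          (PySem.List.pyRange (idx + 1) b 1).foldl (fun s _ => pvStep s) v := by
        apply PySem.List.foldl_congr_mem
        intro acc i hi
        have hi' := (PySem.List.mem_pyRange_one).mp hi
        have : i ∉ BR := by
          intro hin
          have := (hmem i (by omega) (by omega)).mp hin
          rcases List.mem_cons.mp this with rfl | h
          · omega
          · exact absurd (hbrest i h) (by omega)
        show (if i ∈ BR then _ else _) = pvStep acc
        rw [if_neg this]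
        rfl
      have hbBR : b ∈ BR := (hmem b hbb.1 hbb.2).mpr List.mem_cons_self
      have hstep : pvStep^[(b - idx).toNat] v = pvStep (pvStep^[(b - (idx + 1)).toNat] v) := by
        rw [← Function.iterate_succ_apply' pvStep ((b - (idx + 1)).toNat) v]
        congr 1
        omega
      rw [h1, pvFoldl_const, PySem.List.length_pyRange_one, hstep]
      simp [pvStep, hbBR]

-- ===== VERDICT (by name: the statement is the Claim_ definition above) =====
theorem f_spec : Claim_equal_f := by
  intro N A _
  unfold Spec_f f f_alt
  set broken := PySem.List.sorted
    (PySem.Set.ofList (A.filter (fun b => decide (1 ≤ b ∧ b ≤ N)))) (fun x => x) false with hb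
  have hchain : ∀ i : Int, i ∈ broken ↔ (i ∈ A ∧ 1 ≤ i ∧ i ≤ N) := by
    intro i
    rw [hb, PySem.List.mem_sorted, PySem.Set.mem_ofList, List.mem_filter]
    simp
  have hmem : ∀ i : Int, (0:Int) < i → i ≤ N → (i ∈ A ↔ i ∈ broken) := by
    intro i h1 h2
    rw [hchain i]
    constructor
    · exact fun h => ⟨h, by omega, h2⟩
    · exact fun h => h.1
  have hpw : broken.Pairwise (· < ·) := PySem.List.sorted_ofList_pairwise_lt _
  have hbd : ∀ x ∈ broken, (0:Int) < x ∧ x ≤ N := by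
    intro x hx
    have := (hchain x).mp hx
    exact ⟨by omega, this.2.2⟩
  have hred : pvRed ((0 : Int), (1 : Int)) :=
    ⟨by norm_num, by norm_num [pvMOD], by norm_num, by norm_num [pvMOD]⟩
  show (List.foldl _ ((0 : Int), (1 : Int)) _).2 = (pvLoop N broken ((0 : Int), (1 : Int)) 0).2
  rw [pvSeg broken N 0 A ((0 : Int), (1 : Int)) hred hmem hpw hbd,
    show ((0 : Int) + 1) = 1 from by norm_num]
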